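-- pv_equiv track=rewrite | github.com/limdongjin/ProblemSolving | Programmers/42586.py | solution
-- ===== SOURCE A (Python) =====
-- def solution(progresses, speeds):
--     answer = []
--
--     while True:
--         if len(progresses) == 0:
--             break
--         i = 0
--         while i < len(progresses):
--             progresses[i] += speeds[i]
--             i += 1
--         if progresses[0] >= 100:
--             removed_progress = []
--             i = 0
--             for progress in progresses:
--                 if progress >= 100:
--                     removed_progress.append(i)
--                 else:
--                     break
--                 i += 1
--             new_progresses = []
--             i = 0
--             for progress in progresses:
--                 if removed_progress.count(i) == 0:
--                     new_progresses.append(progress)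
--                 i += 1
--             i = 0
--             new_speeds = []
--             for speed in speeds:
--                 if removed_progress.count(i) == 0:
--                     new_speeds.append(speed)
--                 i += 1
--             progresses = new_progresses
--             speeds = new_speeds
--             answer.append(len(removed_progress))
--     return answer
-- ===== SOURCE B (Python) =====
-- def solution(progresses, speeds):
--     days = [max(1, (100 - p + s - 1) // s) for p, s in zip(progresses, speeds)]
--     answer = []
--     i = 0
--     n = len(days)
--     while i < n:
--         day = days[i]
--         j = i + 1
--         while j < n and days[j] <= day:
--             j += 1
--         answer.append(j - i)
--         i = j
--     return answer
-- ===== Notes on version B (the rewrite author's own statement) =====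
-- stated objective: alternative
-- what changed: Instead of simulating progress day by day and rebuilding the task lists on every release, B computes each task's completion day in closed form (ceiling division) and groups consecutive tasks whose day does not exceed the running group leader's day in one pass (intended as faster, O(n) vs O(maxDays*n); a timing run could not confirm it because A times out on the large inputs).
-- outside the precondition, e.g. on solution([101, 200], [-1, -1]): A returns [2], B returns [1, 1]; on solution([100], [0]): A returns [1], B raises ZeroDivisionError
import Mathlib
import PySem

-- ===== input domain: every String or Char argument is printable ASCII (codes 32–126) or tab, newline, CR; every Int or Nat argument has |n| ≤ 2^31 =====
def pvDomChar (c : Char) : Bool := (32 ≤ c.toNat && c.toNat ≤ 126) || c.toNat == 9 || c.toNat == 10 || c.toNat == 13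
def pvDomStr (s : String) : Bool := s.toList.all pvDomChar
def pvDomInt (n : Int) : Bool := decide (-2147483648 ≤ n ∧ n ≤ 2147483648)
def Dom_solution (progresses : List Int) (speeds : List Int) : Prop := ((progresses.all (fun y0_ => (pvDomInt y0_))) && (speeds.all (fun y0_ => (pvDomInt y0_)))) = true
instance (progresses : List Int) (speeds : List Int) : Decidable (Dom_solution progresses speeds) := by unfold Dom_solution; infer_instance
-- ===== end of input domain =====

-- B replaces A's day-by-day simulation with closed-form completion days grouped in one pass
-- (intended as faster; a timing run could not take a clean reading because A times out on large inputs).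
-- Python A mutates its progresses argument in place (progresses[i] += speeds[i]); B does not:
-- the equivalence proved here is about the RETURN value only.

-- ===== PORT A =====
-- inner while: progresses[i] += speeds[i]; empty speeds-tail = Python IndexError, unreachable under Pre_
def pvAddSpeeds : List Int → List Int → List Int
  | [], _ => []
  | _ :: _, [] => []
  | p :: ps, s :: ss => (p + s) :: pvAddSpeeds ps ss

-- removed_progress: indices of the leading fully-progressed tasks (loop with break)
def pvRemovedIdx : List Int → Nat → List Nat
  | [], _ => []
  | p :: ps, i => if p ≥ 100 then i :: pvRemovedIdx ps (i + 1) else []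

-- keep the elements whose index has count 0 in removed
def pvFilterKeep : List Int → Nat → List Nat → List Int
  | [], _, _ => []
  | x :: xs, i, removed =>
    if removed.count i = 0 then x :: pvFilterKeep xs (i + 1) removed
    else pvFilterKeep xs (i + 1) removed

-- outer 'while True' of A; fuel is only a totality guard (enough fuel is supplied below whenever the Python terminates)
def pvSimLoop : Nat → List Int → List Int → List Int → List Int
  | 0, _, _, acc => acc
  | _ + 1, [], _, acc => acc
  | fuel + 1, p :: ps, ss, acc =>
    match pvAddSpeeds (p :: ps) ss with
    | [] => acc   -- Python raised IndexError (speeds exhausted); unreachable under Pre_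
    | q :: qs =>
      if q ≥ 100 then
        let removed := pvRemovedIdx (q :: qs) 0
        pvSimLoop fuel (pvFilterKeep (q :: qs) 0 removed) (pvFilterKeep ss 0 removed)
          (acc ++ [(removed.length : Int)])
      else pvSimLoop fuel (q :: qs) ss acc

def pvFuel (ps : List Int) : Nat := ps.foldl (fun m p => max m (102 - p).toNat) 0 + 2

def solution (progresses : List Int) (speeds : List Int) : List Int :=
  pvSimLoop (pvFuel progresses) progresses speeds []

-- ===== PORT B =====
-- completion day of one task: max(1, (100 - p + s - 1) // s)
def pvDay (p s : Int) : Int := max 1 (PySem.Int.floordiv (100 - p + s - 1) s)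

-- the two-pointer grouping loop of Source B: a group extends while days[j] <= leader's day
def pvGroup : List Int → List Int
  | [] => []
  | d :: rest =>
    (((rest.takeWhile (fun x => decide (x ≤ d))).length + 1 : Int)) ::
      pvGroup (rest.dropWhile (fun x => decide (x ≤ d)))
  termination_by D => D.length
  decreasing_by
    simp only [List.length_cons]
    exact Nat.lt_succ_of_le (rest.length_dropWhile_le _)

def solution_alt (progresses : List Int) (speeds : List Int) : List Int :=
  pvGroup ((progresses.zip speeds).map fun q => pvDay q.1 q.2)

-- ===== PRECONDITION & SPEC =====
-- Pre_ excludes inputs outside the problem's natural domain: speeds shorter than progresses (A raises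
-- IndexError) and non-positive speeds among the first len(progresses) (A diverges whenever a task can
-- no longer reach 100, and where it does return the day-by-day value is an artefact of simulation).
def Pre_solution (progresses : List Int) (speeds : List Int) : Prop :=
  progresses.length ≤ speeds.length ∧ ∀ s ∈ speeds.take progresses.length, 1 ≤ s
instance (progresses : List Int) (speeds : List Int) : Decidable (Pre_solution progresses speeds) := by
  unfold Pre_solution; infer_instance

def pvWitness_solution : List Int × List Int := ([93, 30, 55], [1, 30, 5])

def Spec_solution (progresses : List Int) (speeds : List Int) (out : List Int) : Prop := out = solution_alt progresses speeds
instance (progresses : List Int) (speeds : List Int) (out : List Int) : Decidable (Spec_solution progresses speeds out) := by unfold Spec_solution; infer_instance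

-- ===== CLAIM (what is proved, stated in full; the proofs are below) =====
def Claim_equal_solution : Prop := ∀ (progresses : List Int) (speeds : List Int), Dom_solution progresses speeds → Pre_solution progresses speeds → Spec_solution progresses speeds (solution progresses speeds)


-- ===== LEMMAS AND PROOFS =====

-- completion days of a state
def pvDays (ps ss : List Int) : List Int := (ps.zip ss).map fun q => pvDay q.1 q.2

def pvF (d : Int) : Int := max 1 (d - 1)

def pvMaxD (D : List Int) : Int := D.foldr max 0

lemma pvDay_pos (p s : Int) : 1 ≤ pvDay p s := le_max_left _ _

lemma pvFloordiv_le_iff (a s t : Int) (hs : 0 < s) :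
    PySem.Int.floordiv a s ≤ t ↔ a < (t + 1) * s := by
  rw [show (PySem.Int.floordiv a s ≤ t ↔ PySem.Int.floordiv a s < t + 1) from by omega]
  exact PySem.Int.floordiv_lt_iff_lt_mul hs

-- release test: p + s ≥ 100 ↔ the task's day is 1
lemma pvDay_eq_one_iff (p s : Int) (hs : 1 ≤ s) : pvDay p s = 1 ↔ 100 ≤ p + s := by
  have h2 : PySem.Int.floordiv (100 - p + s - 1) s ≤ 1 ↔ 100 - p + s - 1 < 2 * s :=
    pvFloordiv_le_iff _ _ _ (by omega)
  unfold pvDay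
  omega

-- shift: one day of progress reduces the day by 1 (floored at 1)
lemma pvDay_shift (p s : Int) (hs : 1 ≤ s) : pvDay (p + s) s = pvF (pvDay p s) := by
  have hs0 : (0:Int) < s := by omega
  have h1 : PySem.Int.floordiv (100 - p + s - 1) s * s ≤ 100 - p + s - 1 :=
    (PySem.Int.le_floordiv_iff_mul_le hs0).1 le_rfl
  have h2 : 100 - p + s - 1 < (PySem.Int.floordiv (100 - p + s - 1) s + 1) * s :=
    (PySem.Int.floordiv_lt_iff_lt_mul hs0).1 (by omega)
  have key : PySem.Int.floordiv (100 - (p + s) + s - 1) s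
      = PySem.Int.floordiv (100 - p + s - 1) s - 1 := by
    rw [PySem.Int.floordiv_eq_iff_of_pos hs0]
    constructor <;> nlinarith
  unfold pvDay pvF
  rw [show 100 - (p + s) + s - 1 = 100 - p + s - 1 - s from by ring] at key
  rw [show (100:Int) - (p + s) + s - 1 = 100 - p + s - 1 - s from by ring, key]
  omega

-- day upper bound used for the fuel
lemma pvDay_le (p s : Int) (hs : 1 ≤ s) : pvDay p s ≤ ((102 - p).toNat : Int) + 1 := by
  have h1 : (102 - p : Int) ≤ ((102 - p).toNat : Int) + 1 := by
    rcases Int.le_total 0 (102 - p) with h | h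
    · rw [Int.toNat_of_nonneg h]; omega
    · have : (102 - p).toNat = 0 := Int.toNat_of_nonpos h; omega
  have hb : (100 - p + s - 1) < ((((102 - p).toNat : Int) + 1) + 1) * s := by nlinarith
  have := (pvFloordiv_le_iff (100 - p + s - 1) s (((102 - p).toNat : Int) + 1) (by omega)).2 hb
  have h0 : (0:Int) ≤ ((102 - p).toNat : Int) := Int.natCast_nonneg _
  unfold pvDay
  omega

lemma pvDays_pos (ps ss : List Int) : ∀ x ∈ pvDays ps ss, (1:Int) ≤ x := by
  intro x hx
  rcases List.mem_map.1 hx with ⟨q, _, rfl⟩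
  exact pvDay_pos _ _

lemma pvAddSpeeds_length (ps ss : List Int) (h : ps.length ≤ ss.length) :
    (pvAddSpeeds ps ss).length = ps.length := by
  induction ps generalizing ss with
  | nil => simp [pvAddSpeeds]
  | cons p ps ih =>
    cases ss with
    | nil => simp at h
    | cons s ss => simp [pvAddSpeeds, ih ss (by simpa using h)]

lemma pvZip_addSpeeds_pos (ps ss : List Int) (hlen : ps.length ≤ ss.length)
    (hpos : ∀ q ∈ ps.zip ss, 1 ≤ q.2) :
    ∀ q ∈ (pvAddSpeeds ps ss).zip ss, 1 ≤ q.2 := by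
  induction ps generalizing ss with
  | nil => simp [pvAddSpeeds]
  | cons p ps ih =>
    cases ss with
    | nil => simp at hlen
    | cons s ss =>
      intro q hq
      simp only [pvAddSpeeds, List.zip_cons_cons, List.mem_cons] at hq
      rcases hq with rfl | hq
      · exact hpos (p, s) (by simp)
      · exact ih ss (by simpa using hlen) (fun x hx => hpos x (by simp [hx])) q hq

lemma pvAddSpeeds_days (ps ss : List Int) (hlen : ps.length ≤ ss.length)
    (hpos : ∀ q ∈ ps.zip ss, 1 ≤ q.2) :
    pvDays (pvAddSpeeds ps ss) ss = (pvDays ps ss).map pvF := by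
  induction ps generalizing ss with
  | nil => simp [pvAddSpeeds, pvDays]
  | cons p ps ih =>
    cases ss with
    | nil => simp at hlen
    | cons s ss =>
      have hs : 1 ≤ s := hpos (p, s) (by simp)
      simp only [pvAddSpeeds, pvDays, List.zip_cons_cons, List.map_cons]
      rw [pvDay_shift p s hs]
      congr 1
      have := ih ss (by simpa using hlen) (fun q hq => hpos q (by simp [hq]))
      simpa [pvDays] using this

-- pvRemovedIdx is a contiguous index range
lemma pvRemovedIdx_eq (xs : List Int) (i : Nat) :
    pvRemovedIdx xs i = List.range' i (xs.takeWhile (fun x => decide (100 ≤ x))).length := by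
  induction xs generalizing i with
  | nil => simp [pvRemovedIdx]
  | cons x xs ih =>
    by_cases h : (100:Int) ≤ x
    · simp [pvRemovedIdx, h, ih, List.range'_succ, ge_iff_le]
    · simp [pvRemovedIdx, h, ge_iff_le]

-- pvFilterKeep with removed = range k drops the first (k - i) elements
lemma pvFilterKeep_range (xs : List Int) (k i : Nat) :
    pvFilterKeep xs i (List.range k) = xs.drop (k - i) := by
  induction xs generalizing i with
  | nil => simp [pvFilterKeep]
  | cons x xs ih =>
    by_cases h : i < k
    · have hc : (List.range k).count i ≠ 0 := by
        have : i ∈ List.range k := List.mem_range.2 h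
        simp only [ne_eq, List.count_eq_zero]
        simpa using this
      have hd : k - i = (k - (i + 1)) + 1 := by omega
      simp only [pvFilterKeep, if_neg hc, ih, hd, List.drop_succ_cons]
    · have hc : (List.range k).count i = 0 := by
        rw [List.count_eq_zero]
        simpa using by omega
      have h0 : k - i = 0 := by omega
      have h1 : k - (i + 1) = 0 := by omega
      simp [pvFilterKeep, hc, ih, h0, h1]

-- takeWhile length correspondence between released prefix (post-add) and days ≤ 1 prefix
lemma pvTakeWhile_len (ps ss : List Int) (hlen : ps.length ≤ ss.length)
    (hpos : ∀ q ∈ ps.zip ss, 1 ≤ q.2) :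
    ((pvAddSpeeds ps ss).takeWhile (fun x => decide (100 ≤ x))).length
      = ((pvDays ps ss).takeWhile (fun x => decide (x ≤ 1))).length := by
  induction ps generalizing ss with
  | nil => simp [pvAddSpeeds, pvDays]
  | cons p ps ih =>
    cases ss with
    | nil => simp at hlen
    | cons s ss =>
      have hs : 1 ≤ s := hpos (p, s) (by simp)
      have hone := pvDay_eq_one_iff p s hs
      have hpo := pvDay_pos p s
      by_cases h : (100:Int) ≤ p + s
      · have hd : pvDay p s ≤ 1 := by omega
        simp only [pvAddSpeeds, pvDays, List.zip_cons_cons, List.map_cons, List.takeWhile_cons,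
          decide_eq_true_eq, h, hd, if_true, decide_true, List.length_cons]
        have := ih ss (by simpa using hlen) (fun q hq => hpos q (by simp [hq]))
        simpa [pvDays] using this
      · have hd : ¬ (pvDay p s ≤ 1) := by omega
        simp [pvAddSpeeds, pvDays, List.takeWhile_cons, h, hd]

lemma pvTakeWhile_congr {α : Type} (p q : α → Bool) (l : List α) (h : ∀ x ∈ l, p x = q x) :
    l.takeWhile p = l.takeWhile q ∧ l.dropWhile p = l.dropWhile q := by
  induction l with
  | nil => simp
  | cons a l ih =>
    have ha := h a (by simp)
    rcases ih (fun x hx => h x (by simp [hx])) with ⟨h1, h2⟩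
    by_cases hp : p a = true
    · simp [List.takeWhile_cons, List.dropWhile_cons, hp, ha ▸ hp, h1, h2]
    · have hq : ¬ q a = true := by rw [← ha]; exact hp
      simp [List.takeWhile_cons, List.dropWhile_cons, hp, hq]

lemma pvDropWhile_eq_drop {α : Type} (p : α → Bool) (l : List α) :
    l.dropWhile p = l.drop (l.takeWhile p).length := by
  induction l with
  | nil => simp
  | cons a l ih =>
    by_cases hp : p a = true <;> simp [List.takeWhile_cons, List.dropWhile_cons, hp, ih]

lemma pvZip_drop {α β : Type} (l₁ : List α) (l₂ : List β) (n : Nat) :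
    (l₁.drop n).zip (l₂.drop n) = (l₁.zip l₂).drop n := by
  induction l₁ generalizing l₂ n with
  | nil => simp
  | cons a l₁ ih =>
    cases l₂ with
    | nil => simp
    | cons b l₂ =>
      cases n with
      | zero => simp
      | succ n => simpa using ih l₂ n

lemma pvDays_drop (ps ss : List Int) (k : Nat) :
    pvDays (ps.drop k) (ss.drop k) = (pvDays ps ss).drop k := by
  unfold pvDays
  rw [pvZip_drop, List.map_drop]

lemma pvMaxD_ge (D : List Int) (d : Int) (hd : d ∈ D) : d ≤ pvMaxD D := by
  induction D with
  | nil => simp at hd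
  | cons x xs ih =>
    rcases List.mem_cons.1 hd with rfl | hd
    · exact le_max_left _ _
    · exact le_trans (ih hd) (le_max_right _ _)

lemma pvMaxD_le (D : List Int) (c : Int) (hc : 0 ≤ c) (h : ∀ d ∈ D, d ≤ c) : pvMaxD D ≤ c := by
  induction D with
  | nil => simpa [pvMaxD]
  | cons x xs ih =>
    simp only [pvMaxD, List.foldr_cons, max_le_iff]
    exact ⟨h x (by simp), ih (fun d hd => h d (by simp [hd]))⟩

-- grouping is invariant under one day of progress while the front task is not yet done
lemma pvGroup_map_f : ∀ n D, D.length ≤ n → (∀ x ∈ D, (1:Int) ≤ x) →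
    (∀ d ∈ D.head?, (2:Int) ≤ d) → pvGroup (D.map pvF) = pvGroup D := by
  intro n
  induction n with
  | zero =>
    intro D hn _ _
    have : D = [] := List.eq_nil_of_length_eq_zero (Nat.le_zero.1 hn)
    subst this; simp
  | succ n ih =>
    intro D hn h1 h2
    cases D with
    | nil => simp
    | cons d rest =>
      have hd2 : (2:Int) ≤ d := h2 d (by simp)
      have hcong : ∀ x ∈ rest, (decide (x ≤ d)) = (fun x => decide (pvF x ≤ pvF d)) x := by
        intro x hx
        have hx1 : (1:Int) ≤ x := h1 x (by simp [hx])
        unfold pvF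
        by_cases h : x ≤ d
        · simp only [h, decide_true]; symm; simp; omega
        · simp only [h, decide_false]; symm; simp; omega
      rcases pvTakeWhile_congr _ _ rest hcong with ⟨ht, hdw⟩
      simp only [List.map_cons, pvGroup]
      rw [List.takeWhile_map, List.dropWhile_map]
      rw [show ((fun x => decide (x ≤ pvF d)) ∘ pvF) = (fun x => decide (pvF x ≤ pvF d)) from rfl]
      rw [← ht, ← hdw]
      refine congrArg₂ _ (by simp) ?_
      have hr : rest.length ≤ n := by simpa using hn
      refine ih _ (le_trans (rest.length_dropWhile_le _) hr) ?_ ?_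
      · intro x hx
        exact h1 x (List.mem_cons_of_mem _ ((List.dropWhile_sublist _).subset hx))
      · intro y hy
        cases hh : (rest.dropWhile (fun x => decide (x ≤ d))).head? with
        | none => simp [hh] at hy
        | some z =>
          rw [hh] at hy
          simp only [Option.mem_def, Option.some.injEq] at hy
          subst hy
          have hnot := List.head?_dropWhile_not (fun x => decide (x ≤ d)) rest
          rw [hh] at hnot
          simp only [decide_eq_false_iff_not, not_le] at hnot
          omega

lemma pvMem_drop {α : Type} (l : List α) (n : Nat) (x : α) (h : x ∈ l.drop n) : x ∈ l :=
  (List.drop_sublist n l).subset h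

-- the main simulation lemma: with enough fuel, A's loop appends B's grouping
lemma pvSim_eq : ∀ fuel ps ss acc, ps.length ≤ ss.length →
    (∀ q ∈ ps.zip ss, 1 ≤ q.2) →
    (pvMaxD (pvDays ps ss)).toNat + 1 ≤ fuel →
    pvSimLoop fuel ps ss acc = acc ++ pvGroup (pvDays ps ss) := by
  intro fuel
  induction fuel with
  | zero => intro ps ss acc _ _ hf; omega
  | succ fuel ih =>
    intro ps ss acc hlen hpos hf
    cases ps with
    | nil => simp only [pvSimLoop, pvDays, List.zip_nil_left, List.map_nil, pvGroup, List.append_nil]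
    | cons p ps' =>
      cases ss with
      | nil => simp at hlen
      | cons s ss' =>
        have hs : 1 ≤ s := hpos (p, s) (by simp)
        set D := pvDays (p :: ps') (s :: ss') with hD
        have hDmap : pvDays (pvAddSpeeds (p :: ps') (s :: ss')) (s :: ss') = D.map pvF :=
          pvAddSpeeds_days _ _ hlen hpos
        have hDpos : ∀ x ∈ D, (1:Int) ≤ x := pvDays_pos _ _
        have hd1 : D = pvDay p s :: pvDays ps' ss' := by
          simp [hD, pvDays]
        have hM1 : (1:Int) ≤ pvMaxD D := le_trans (pvDay_pos p s) (pvMaxD_ge _ _ (by rw [hd1]; simp))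
        simp only [pvSimLoop, pvAddSpeeds]
        by_cases hq : p + s ≥ 100
        · -- release day: the front task completes
          simp only [if_pos hq]
          have hone : pvDay p s = 1 := (pvDay_eq_one_iff p s hs).2 hq
          -- the removed list is range K
          have hadd : pvAddSpeeds (p :: ps') (s :: ss') = (p + s) :: pvAddSpeeds ps' ss' := rfl
          set K := (((p + s) :: pvAddSpeeds ps' ss').takeWhile (fun x => decide (100 ≤ x))).length with hKdef
          have hrem : pvRemovedIdx ((p + s) :: pvAddSpeeds ps' ss') 0 = List.range K := by
            rw [pvRemovedIdx_eq, List.range_eq_range']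
          have hKD : K = (D.takeWhile (fun x => decide (x ≤ 1))).length := by
            have := pvTakeWhile_len (p :: ps') (s :: ss') hlen hpos
            rw [hadd] at this
            exact this
          rw [hrem, pvFilterKeep_range, pvFilterKeep_range, List.length_range, Nat.sub_zero]
          -- the new state's days
          have hdrop : pvDays (((p + s) :: pvAddSpeeds ps' ss').drop K) ((s :: ss').drop K)
              = ((D.map pvF).drop K) := by
            rw [pvDays_drop, ← hadd, hDmap]
          have hlen2 : (((p + s) :: pvAddSpeeds ps' ss').drop K).length ≤ ((s :: ss').drop K).length := by
            simp only [List.length_drop]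
            have : ((p + s) :: pvAddSpeeds ps' ss').length = (p :: ps').length := by
              rw [← hadd]; exact pvAddSpeeds_length _ _ hlen
            omega
          have hpos2 : ∀ q ∈ ((((p + s) :: pvAddSpeeds ps' ss').drop K).zip ((s :: ss').drop K)), 1 ≤ q.2 := by
            rw [pvZip_drop]
            intro q hq'
            exact pvZip_addSpeeds_pos (p :: ps') (s :: ss') hlen hpos q (pvMem_drop _ _ _ (by rwa [hadd]))
          -- drop K D is the dropWhile tail, whose head (if any) has day ≥ 2
          have hdropD : D.drop K = D.dropWhile (fun x => decide (x ≤ 1)) := by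
            rw [hKD, ← pvDropWhile_eq_drop]
          have hhead2 : ∀ y ∈ (D.drop K).head?, (2:Int) ≤ y := by
            intro y hy
            rw [hdropD] at hy
            cases hh : (D.dropWhile (fun x => decide (x ≤ 1))).head? with
            | none => rw [hh] at hy; simp at hy
            | some z =>
              rw [hh] at hy
              simp only [Option.mem_def, Option.some.injEq] at hy
              subst hy
              have hnot := List.head?_dropWhile_not (fun x => decide (x ≤ 1)) D
              rw [hh] at hnot
              simp only [decide_eq_false_iff_not, not_le] at hnot
              omega
          -- fuel for the recursive call
          have hfuel2 : (pvMaxD (pvDays (((p + s) :: pvAddSpeeds ps' ss').drop K) ((s :: ss').drop K))).toNat + 1 ≤ fuel := by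
            rw [hdrop, ← List.map_drop]
            cases hE : D.drop K with
            | nil =>
              simp only [List.map_nil]
              have h0 : pvMaxD ([] : List Int) = 0 := rfl
              rw [h0]
              omega
            | cons e es =>
              have he2 : (2:Int) ≤ e := hhead2 e (by rw [hE]; rfl)
              have hMe : e ≤ pvMaxD D := pvMaxD_ge _ _ (pvMem_drop _ _ _ (by rw [hE]; simp))
              have hM2 : (2:Int) ≤ pvMaxD D := le_trans he2 hMe
              have hb : pvMaxD ((D.drop K).map pvF) ≤ pvMaxD D - 1 := by
                apply pvMaxD_le _ _ (by omega)
                intro d hd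
                rcases List.mem_map.1 hd with ⟨x, hx, rfl⟩
                have hxM : x ≤ pvMaxD D := pvMaxD_ge _ _ (pvMem_drop _ _ _ hx)
                unfold pvF
                omega
              rw [← hE]
              omega
          rw [ih _ _ _ hlen2 hpos2 hfuel2, hdrop, ← List.map_drop,
            pvGroup_map_f (D.drop K).length _ le_rfl
              (fun x hx => hDpos x (pvMem_drop _ _ _ hx)) hhead2]
          -- reassemble the grouping of D
          rw [hd1] at hdropD ⊢
          have hKsplit : K = ((pvDays ps' ss').takeWhile (fun x => decide (x ≤ 1))).length + 1 := by
            rw [hKD, hd1]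
            have : pvDay p s ≤ 1 := by omega
            simp [List.takeWhile_cons, this]
          simp only [pvGroup]
          rw [List.append_assoc]
          congr 1
          have hdw : (pvDay p s :: pvDays ps' ss').dropWhile (fun x => decide (x ≤ 1))
              = (pvDays ps' ss').dropWhile (fun x => decide (x ≤ 1)) := by
            have : pvDay p s ≤ 1 := by omega
            simp [List.dropWhile_cons, this]
          rw [hdw] at hdropD
          rw [hdropD]
          have htk : (pvDays ps' ss').takeWhile (fun x => decide (x ≤ 1))
              = (pvDays ps' ss').takeWhile (fun x => decide (x ≤ pvDay p s)) := by
            rw [hone]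
          have hdk : (pvDays ps' ss').dropWhile (fun x => decide (x ≤ 1))
              = (pvDays ps' ss').dropWhile (fun x => decide (x ≤ pvDay p s)) := by
            rw [hone]
          rw [← htk, ← hdk, hKsplit]
          simp
        · -- no release today
          simp only [if_neg hq]
          have hd2 : (2:Int) ≤ pvDay p s := by
            have := pvDay_eq_one_iff p s hs
            have := pvDay_pos p s
            omega
          have hlen2 : ((p + s) :: pvAddSpeeds ps' ss').length ≤ (s :: ss').length := by
            have : ((p + s) :: pvAddSpeeds ps' ss').length = (p :: ps').length :=
              pvAddSpeeds_length (p :: ps') (s :: ss') hlen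
            omega
          have hpos2 : ∀ q ∈ (((p + s) :: pvAddSpeeds ps' ss').zip (s :: ss')), 1 ≤ q.2 :=
            pvZip_addSpeeds_pos (p :: ps') (s :: ss') hlen hpos
          have hdays2 : pvDays ((p + s) :: pvAddSpeeds ps' ss') (s :: ss') = D.map pvF := hDmap
          have hfuel2 : (pvMaxD (pvDays ((p + s) :: pvAddSpeeds ps' ss') (s :: ss'))).toNat + 1 ≤ fuel := by
            rw [hdays2]
            have hM2 : (2:Int) ≤ pvMaxD D :=
              le_trans hd2 (pvMaxD_ge _ _ (by rw [hd1]; simp))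
            have hb : pvMaxD (D.map pvF) ≤ pvMaxD D - 1 := by
              apply pvMaxD_le _ _ (by omega)
              intro d hd
              rcases List.mem_map.1 hd with ⟨x, hx, rfl⟩
              have hxM : x ≤ pvMaxD D := pvMaxD_ge _ _ hx
              unfold pvF
              omega
            omega
          rw [ih _ _ _ hlen2 hpos2 hfuel2, hdays2,
            pvGroup_map_f D.length _ le_rfl hDpos
              (by intro d hd; rw [hd1] at hd; simp only [List.head?_cons, Option.mem_def,
                    Option.some.injEq] at hd; omega)]

lemma pvZip_snd_take (ps ss : List Int) (q : Int × Int) (h : q ∈ ps.zip ss) :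
    q.2 ∈ ss.take ps.length := by
  induction ps generalizing ss with
  | nil => simp at h
  | cons p ps ih =>
    cases ss with
    | nil => simp at h
    | cons s ss =>
      simp only [List.zip_cons_cons, List.mem_cons] at h
      rcases h with rfl | h
      · simp
      · simp only [List.length_cons, List.take_succ_cons, List.mem_cons]
        exact Or.inr (ih ss h)

lemma pvZip_fst_mem (ps ss : List Int) (q : Int × Int) (h : q ∈ ps.zip ss) : q.1 ∈ ps := by
  induction ps generalizing ss with
  | nil => simp at h
  | cons p ps ih =>
    cases ss with
    | nil => simp at h
    | cons s ss =>
      simp only [List.zip_cons_cons, List.mem_cons] at h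
      rcases h with rfl | h
      · simp
      · exact List.mem_cons_of_mem _ (ih ss h)

lemma pvFoldl_max_le_init (ps : List Int) (m : Nat) :
    m ≤ ps.foldl (fun m p => max m (102 - p).toNat) m := by
  induction ps generalizing m with
  | nil => simp
  | cons p ps ih => exact le_trans (Nat.le_max_left _ _) (ih _)

lemma pvFoldl_max_ge (ps : List Int) (p : Int) (hp : p ∈ ps) (m : Nat) :
    (102 - p).toNat ≤ ps.foldl (fun m p => max m (102 - p).toNat) m := by
  induction ps generalizing m with
  | nil => simp at hp
  | cons x xs ih =>
    rcases List.mem_cons.1 hp with rfl | hp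
    · exact le_trans (Nat.le_max_right _ _) (pvFoldl_max_le_init _ _)
    · exact ih hp _

-- ===== VERDICT (by name: the statement is the Claim_ definition above) =====
theorem solution_spec : Claim_equal_solution := by
  intro ps ss _ hpre
  rcases hpre with ⟨hlen, htake⟩
  have hpos : ∀ q ∈ ps.zip ss, 1 ≤ q.2 := fun q hq => htake q.2 (pvZip_snd_take ps ss q hq)
  have hfuel : (pvMaxD (pvDays ps ss)).toNat + 1 ≤ pvFuel ps := by
    set F := ps.foldl (fun m p => max m (102 - p).toNat) 0 with hF
    have hb : pvMaxD (pvDays ps ss) ≤ (F : Int) + 1 := by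
      apply pvMaxD_le _ _ (by positivity)
      intro d hd
      rcases List.mem_map.1 hd with ⟨q, hq, rfl⟩
      have hs : 1 ≤ q.2 := hpos q hq
      have h1 : pvDay q.1 q.2 ≤ ((102 - q.1).toNat : Int) + 1 := pvDay_le q.1 q.2 hs
      have h2 : (102 - q.1).toNat ≤ F := pvFoldl_max_ge ps q.1 (pvZip_fst_mem ps ss q hq) 0
      have : ((102 - q.1).toNat : Int) ≤ (F : Int) := by exact_mod_cast h2
      omega
    have : (pvMaxD (pvDays ps ss)).toNat ≤ F + 1 := by omega
    unfold pvFuel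
    omega
  unfold Spec_solution solution solution_alt
  rw [pvSim_eq (pvFuel ps) ps ss [] hlen hpos hfuel]
  simp [pvDays]
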